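-- pv_equiv track=rewrite | github.com/Cadenza-Labs/elk_old | elk/utils_generation/load_utils.py | get_balanced_sample_num
-- ===== SOURCE A (Python) =====
-- def get_balanced_sample_num(sample_amount, num_labels):
--     """
--     Get the number of samples per label to balance the dataset.
--
--     Args:
--         sample_amount: int, the number of samples to take.
--         num_labels: int, the number of labels in the dataset.
--
--     Returns:
--         balanced_sample_num: list of int, the number of samples per label.
--     """
--
--     samples_per_group = sample_amount // num_labels
--     remaining_samples = sample_amount - samples_per_group * num_labels
--     balanced_sample_num = []
--     for i in range(num_labels):
--         if i < num_labels - remaining_samples: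
--             balanced_sample_num.append(samples_per_group)
--         else:
--             balanced_sample_num.append(samples_per_group + 1)
--     return balanced_sample_num
-- ===== SOURCE B (Python) =====
-- def get_balanced_sample_num(sample_amount, num_labels):
--     """Greedy fair split: each label in turn takes the floor share of what
--     is still left, shrinking the residual"""
--     quotas = []
--     while num_labels > 0:
--         share = sample_amount // num_labels
--         quotas.append(share)
--         sample_amount -= share
--         num_labels -= 1
--     return quotas
-- ===== Notes on version B (the rewrite author's own statement) =====
-- stated objective: alternative
-- what changed: B replaces A's precomputed floor-quotient-plus-remainder branch loop with a greedy residual split: each label takes the floor share of the samples still remaining, so no remainder or branch is needed; Pre_ excludes only num_labels == 0, where A raises ZeroDivisionError.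
import Mathlib
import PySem

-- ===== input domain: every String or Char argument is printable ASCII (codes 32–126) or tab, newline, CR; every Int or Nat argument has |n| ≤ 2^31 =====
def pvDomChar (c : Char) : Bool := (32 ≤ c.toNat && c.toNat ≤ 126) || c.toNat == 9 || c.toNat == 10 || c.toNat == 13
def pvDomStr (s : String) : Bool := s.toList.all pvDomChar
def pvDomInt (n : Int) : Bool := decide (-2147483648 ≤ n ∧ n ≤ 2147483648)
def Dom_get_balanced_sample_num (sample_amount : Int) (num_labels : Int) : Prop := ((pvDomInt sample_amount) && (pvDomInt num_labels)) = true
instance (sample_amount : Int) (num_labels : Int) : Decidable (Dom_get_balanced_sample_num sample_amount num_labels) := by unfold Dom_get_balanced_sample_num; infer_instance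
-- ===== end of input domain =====

-- B replaces A's precomputed quotient+remainder branch loop with a greedy residual
-- split (each label takes the floor share of what remains); same cost, alternative
-- algorithm. Pre_ excludes only num_labels = 0, where Python A raises.


-- ===== PORT A =====
def get_balanced_sample_num (sample_amount : Int) (num_labels : Int) : List Int :=
  let samples_per_group := PySem.Int.floordiv sample_amount num_labels
  let remaining_samples := sample_amount - samples_per_group * num_labels
  (PySem.List.pyRange 0 num_labels 1).foldl
    (fun balanced_sample_num i =>
      if i < num_labels - remaining_samples then
        balanced_sample_num ++ [samples_per_group]
      else
        balanced_sample_num ++ [samples_per_group + 1])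
    []

-- ===== PORT B =====
-- the while-loop of Source B, structural on a fuel counter (= the number of remaining
-- iterations, num_labels.toNat, so the fuel guard never fires before the loop test)
def gbsnLoop (fuel : Nat) (sample_amount : Int) (num_labels : Int) (quotas : List Int) : List Int :=
  match fuel with
  | 0 => quotas
  | fuel + 1 =>
    if 0 < num_labels then
      let share := PySem.Int.floordiv sample_amount num_labels
      gbsnLoop fuel (sample_amount - share) (num_labels - 1) (quotas ++ [share])
    else quotas

def get_balanced_sample_num_alt (sample_amount : Int) (num_labels : Int) : List Int :=
  gbsnLoop num_labels.toNat sample_amount num_labels []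

-- ===== PRECONDITION & SPEC =====
-- Pre_ excludes exactly num_labels = 0, where Python A raises ZeroDivisionError.
def Pre_get_balanced_sample_num (sample_amount : Int) (num_labels : Int) : Prop := num_labels ≠ 0
instance (sample_amount : Int) (num_labels : Int) : Decidable (Pre_get_balanced_sample_num sample_amount num_labels) := by unfold Pre_get_balanced_sample_num; infer_instance
def pvWitness_get_balanced_sample_num : Int × Int := (7, 4)

def Spec_get_balanced_sample_num (sample_amount : Int) (num_labels : Int) (out : List Int) : Prop := out = get_balanced_sample_num_alt sample_amount num_labels
instance (sample_amount : Int) (num_labels : Int) (out : List Int) : Decidable (Spec_get_balanced_sample_num sample_amount num_labels out) := by unfold Spec_get_balanced_sample_num; infer_instance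

-- ===== CLAIM =====
def Claim_equal_get_balanced_sample_num : Prop := ∀ (sample_amount : Int) (num_labels : Int), Dom_get_balanced_sample_num sample_amount num_labels → Pre_get_balanced_sample_num sample_amount num_labels → Spec_get_balanced_sample_num sample_amount num_labels (get_balanced_sample_num sample_amount num_labels)

-- ===== LEMMAS AND PROOFS =====

-- uniqueness of Python floor quotient/remainder for a positive divisor
lemma gbsn_fdiv_mod_unique (a b q r : Int) (hb : 0 < b) (h : a = q * b + r)
    (h0 : 0 ≤ r) (h1 : r < b) :
    PySem.Int.floordiv a b = q ∧ PySem.Int.mod a b = r := by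
  have hq : PySem.Int.floordiv a b = q := by
    rw [PySem.Int.floordiv_eq_iff_of_pos hb]
    constructor
    · rw [h]; linarith
    · rw [h]; nlinarith
  refine ⟨hq, ?_⟩
  have hm := PySem.Int.floordiv_mul_add_mod a b
  rw [hq] at hm
  linarith

-- closed form of Source B's loop: the first n - (s mod n) labels get ⌊s/n⌋, the rest one more
lemma gbsnLoop_eq (m : Nat) : ∀ (s n : Int) (acc : List Int), n.toNat = m →
    gbsnLoop m s n acc = acc ++ (List.range m).map
      (fun k : Nat => if ((k : Int)) < n - PySem.Int.mod s n
                then PySem.Int.floordiv s n else PySem.Int.floordiv s n + 1) := by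
  induction m with
  | zero =>
    intro s n acc hm
    simp [gbsnLoop]
  | succ m ih =>
    intro s n acc hm
    have hn : 0 < n := by omega
    set q := PySem.Int.floordiv s n with hqdef
    set r := PySem.Int.mod s n with hrdef
    have hsplit : q * n + r = s := PySem.Int.floordiv_mul_add_mod s n
    have hr0 : 0 ≤ r := PySem.Int.mod_nonneg s hn
    have hrn : r < n := PySem.Int.mod_lt s hn
    rw [show gbsnLoop (m + 1) s n acc
          = gbsnLoop m (s - PySem.Int.floordiv s n) (n - 1) (acc ++ [PySem.Int.floordiv s n])
        from by rw [gbsnLoop]; simp only [if_pos hn]]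
    rw [← hqdef]
    rw [ih (s - q) (n - 1) (acc ++ [q]) (by omega)]
    rw [List.range_succ_eq_map, List.map_cons, List.map_map]
    have h0 : (if ((0 : Nat) : Int) < n - r then q else q + 1) = q := by
      rw [if_pos (by push_cast; omega)]
    rw [List.append_assoc]
    congr 1
    rw [h0, List.singleton_append]
    congr 1
    rcases Nat.eq_zero_or_pos m with hm0 | hmpos
    · subst hm0; simp
    · have hn1 : 0 < n - 1 := by omega
      have hval : s - q = q * (n - 1) + r := by linarith
      by_cases hcase : r < n - 1
      · obtain ⟨hq', hr'⟩ := gbsn_fdiv_mod_unique (s - q) (n - 1) q r hn1 hval hr0 hcase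
        apply List.map_congr_left
        intro k hk
        simp only [Function.comp, hq', hr']
        have : ((k.succ : Nat) : Int) = (k : Int) + 1 := by push_cast; ring
        rw [this]
        split_ifs with h1 h2 h2 <;> first | rfl | omega
      · have hreq : r = n - 1 := by omega
        have hval' : s - q = (q + 1) * (n - 1) + 0 := by
          rw [hreq] at hval; linear_combination hval
        obtain ⟨hq', hr'⟩ := gbsn_fdiv_mod_unique (s - q) (n - 1) (q + 1) 0 hn1 hval' le_rfl hn1
        apply List.map_congr_left
        intro k hk
        simp only [Function.comp, hq', hr']
        have hkm : k < m := List.mem_range.mp hk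
        have : ((k.succ : Nat) : Int) = (k : Int) + 1 := by push_cast; ring
        rw [this]
        clear hval hval' hsplit
        split_ifs <;> omega

-- ===== VERDICT =====
theorem get_balanced_sample_num_spec : Claim_equal_get_balanced_sample_num := by
  intro s n _ hn
  unfold Spec_get_balanced_sample_num get_balanced_sample_num get_balanced_sample_num_alt
  simp only []
  rcases lt_or_gt_of_ne hn with hneg | hpos
  · rw [PySem.List.pyRange_one_eq_nil (by omega : n ≤ (0:Int))]
    simp [show n.toNat = 0 by omega, gbsnLoop]
  · set q := PySem.Int.floordiv s n with hq
    have hmod := PySem.Int.floordiv_mul_add_mod s n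
    rw [← hq] at hmod
    have hrmod : s - q * n = PySem.Int.mod s n := by linarith
    have hfun : (fun (acc : List Int) i => if i < n - (s - q * n) then acc ++ [q] else acc ++ [q + 1])
        = fun acc i => acc ++ [if i < n - (s - q * n) then q else q + 1] := by
      funext acc i; split_ifs <;> rfl
    rw [hfun, PySem.List.foldl_append_singleton_eq_map]
    rw [gbsnLoop_eq n.toNat s n [] rfl]
    rw [PySem.List.pyRange_one 0 n, List.map_map]
    simp only [List.nil_append, Int.sub_zero]
    apply List.map_congr_left
    intro k _
    simp only [Function.comp, zero_add, hrmod, ← hq]
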